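-- pv_equiv track=rewrite | github.com/Olcmyk/Meowth-GBA-Translator | src/meowth/text_wrap.py | _distribute_lines
-- ===== SOURCE A (Python) =====
-- def _distribute_lines(lines: list[str], lines_per_box: int) -> str:
--     """Distribute wrapped lines into text boxes.
--
--     Uses \\n for newlines within a box, \\p for page breaks between boxes.
--     """
--     if not lines:
--         return ""
--
--     parts: list[str] = []
--     line_in_box = 0
--
--     for i, line in enumerate(lines):
--         if i > 0:
--             if line_in_box >= lines_per_box:
--                 parts.append("\\p")
--                 line_in_box = 0
--             else:
--                 parts.append("\\n")
--         parts.append(line)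
--         line_in_box += 1
--
--     return "".join(parts)
-- ===== SOURCE B (Python) =====
-- def _distribute_lines(lines: list[str], lines_per_box: int) -> str:
--     """Distribute wrapped lines into text boxes.
--
--     Uses \\n for newlines within a box, \\p for page breaks between boxes.
--     """
--     size = max(lines_per_box, 1)
--     boxes = ["\\n".join(lines[i:i + size]) for i in range(0, len(lines), size)]
--     return "\\p".join(boxes)
-- ===== Notes on version B (the rewrite author's own statement) =====
-- stated objective: simpler
-- what changed: Replaces A's single enumerate loop with a per-line box counter and explicit separator appends by slicing the lines into consecutive boxes of max(lines_per_box,1) lines and joining them with '\n' inside a box and '\p' between boxes.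
import Mathlib
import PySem

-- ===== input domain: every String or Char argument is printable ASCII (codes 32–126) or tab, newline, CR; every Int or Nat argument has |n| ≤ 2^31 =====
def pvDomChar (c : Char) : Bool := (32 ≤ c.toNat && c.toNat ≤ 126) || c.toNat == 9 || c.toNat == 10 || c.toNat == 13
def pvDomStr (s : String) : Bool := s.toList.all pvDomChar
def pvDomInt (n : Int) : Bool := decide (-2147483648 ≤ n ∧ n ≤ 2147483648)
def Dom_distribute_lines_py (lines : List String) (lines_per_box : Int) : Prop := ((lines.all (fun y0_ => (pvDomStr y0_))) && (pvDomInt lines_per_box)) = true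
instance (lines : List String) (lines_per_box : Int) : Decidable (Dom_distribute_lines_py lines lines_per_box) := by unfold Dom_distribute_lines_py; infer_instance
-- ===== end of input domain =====

-- B replaces A's single counter-driven loop by slicing the lines into boxes of max(lines_per_box,1)
-- lines and joining them ('\n' inside a box, '\p' between boxes); same return value, simpler decomposition.

-- ===== PORT A =====
def loopA (lines_per_box : Int) (st : List String × Int) (p : Int × String) : List String × Int :=
  if p.1 > 0 then
    if st.2 ≥ lines_per_box then ((st.1 ++ ["\\p"]) ++ [p.2], 0 + 1)
    else ((st.1 ++ ["\\n"]) ++ [p.2], st.2 + 1)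
  else (st.1 ++ [p.2], st.2 + 1)

def distribute_lines_py (lines : List String) (lines_per_box : Int) : String :=
  if lines = [] then ""
  else PySem.Str.join "" ((PySem.List.enumerate lines).foldl (loopA lines_per_box) ([], 0)).1

-- ===== PORT B =====
def distribute_lines_py_alt (lines : List String) (lines_per_box : Int) : String :=
  let size : Int := max lines_per_box 1
  let boxes := (PySem.List.pyRange 0 (lines.length : Int) size).map
    (fun i => PySem.Str.join "\\n" (PySem.List.slice lines (some i) (some (i + size))))
  PySem.Str.join "\\p" boxes

-- ===== PRECONDITION & SPEC =====
def Spec_distribute_lines_py (lines : List String) (lines_per_box : Int) (out : String) : Prop := out = distribute_lines_py_alt lines lines_per_box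
instance (lines : List String) (lines_per_box : Int) (out : String) : Decidable (Spec_distribute_lines_py lines lines_per_box out) := by unfold Spec_distribute_lines_py; infer_instance

-- ===== CLAIM (what is proved, stated in full; the proofs are below) =====
def Claim_equal_distribute_lines_py : Prop := ∀ (lines : List String) (lines_per_box : Int), Dom_distribute_lines_py lines lines_per_box → Spec_distribute_lines_py lines lines_per_box (distribute_lines_py lines lines_per_box)

-- ===== LEMMAS AND PROOFS =====

-- the common shape both programs produce after the first line: each later line is preceded by
-- "\\n" while the current box has room, by "\\p" when it is full (c = remaining room, sz = box size)
def glueP (sz : Nat) : List String → Nat → List String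
  | [], _ => []
  | l :: ls, 0 => "\\p" :: l :: glueP sz ls (sz - 1)
  | l :: ls, c+1 => "\\n" :: l :: glueP sz ls c

lemma pyRange_pos_nil (a b s : Int) (hs : 0 < s) (h : b ≤ a) :
    PySem.List.pyRange a b s = [] := by
  rw [PySem.List.pyRange_of_pos _ _ hs]
  simp [show ¬ a < b by omega]

lemma pyRange_pos_cons (a b s : Int) (hs : 0 < s) (h : a < b) :
    PySem.List.pyRange a b s = a :: PySem.List.pyRange (a + s) b s := by
  rw [PySem.List.pyRange_of_pos _ _ hs, PySem.List.pyRange_of_pos _ _ hs, if_pos h]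
  by_cases h2 : a + s < b
  · rw [if_pos h2]
    have key : b - a + s - 1 = (b - (a + s) + s - 1) + 1 * s := by ring
    have hdiv : (b - a + s - 1) / s = (b - (a + s) + s - 1) / s + 1 := by
      rw [key, Int.add_mul_ediv_right _ _ (by omega : s ≠ 0)]
    have hnn : 0 ≤ (b - (a + s) + s - 1) / s := Int.ediv_nonneg (by omega) (by omega)
    rw [hdiv, show ((b - (a + s) + s - 1) / s + 1).toNat = ((b - (a + s) + s - 1) / s).toNat + 1 by omega]
    rw [List.range_succ_eq_map]
    simp only [List.map_cons, List.map_map]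
    refine List.cons_eq_cons.mpr ⟨by simp, ?_⟩
    apply List.map_congr_left
    intro k _
    simp only [Function.comp_apply]
    push_cast
    ring
  · rw [if_neg h2]
    have h1 : (b - a + s - 1) / s = 1 := by
      rw [← PySem.Int.floordiv_eq_ediv_of_pos hs, PySem.Int.floordiv_eq_iff_of_pos hs]
      omega
    rw [h1]
    simp

lemma pyRange_pos_shift (a b s c : Int) (hs : 0 < s) :
    PySem.List.pyRange (a + c) (b + c) s = (PySem.List.pyRange a b s).map (· + c) := by
  rw [PySem.List.pyRange_of_pos _ _ hs, PySem.List.pyRange_of_pos _ _ hs]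
  have he : b + c - (a + c) = b - a := by ring
  have hiff : (a + c < b + c) ↔ (a < b) := by omega
  simp only [he, hiff, List.map_map]
  apply List.map_congr_left
  intro k _
  simp only [Function.comp_apply]
  ring

lemma interOne (P : List Char) (x : List Char) : P.intercalate [x] = x := by
  simp [List.intercalate]

lemma interCons (P : List Char) (x y : List Char) (t : List (List Char)) :
    P.intercalate (x :: y :: t) = x ++ P ++ P.intercalate (y :: t) := by
  simp [List.intercalate, List.intersperse]

lemma interN (N : List Char) : ∀ (t : List String) (l : String),
    N.intercalate ((l :: t).map String.toList) = l.toList ++ t.flatMap (fun y => N ++ y.toList) := by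
  intro t
  induction t with
  | nil => intro l; simp [interOne]
  | cons y ys ih =>
    intro l
    simp only [List.map_cons] at ih ⊢
    rw [interCons, ih y]
    simp [List.append_assoc]

lemma interNilFlat : ∀ (L : List (List Char)), ([] : List Char).intercalate L = L.flatten := by
  intro L
  induction L with
  | nil => rfl
  | cons x t ih =>
    cases t with
    | nil => simp [interOne]
    | cons y ys =>
      rw [interCons, ih]
      simp

lemma glueP_eq (sz : Nat) : ∀ (c : Nat) (xs : List String),
    glueP sz xs c = (xs.take c).flatMap (fun y => ["\\n", y]) ++
      (match xs.drop c with
       | [] => []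
       | y :: ys => "\\p" :: y :: glueP sz ys (sz - 1)) := by
  intro c
  induction c with
  | zero =>
    intro xs
    cases xs with
    | nil => simp [glueP]
    | cons y ys => simp [glueP]
  | succ c ih =>
    intro xs
    cases xs with
    | nil => simp [glueP]
    | cons y ys => simp [glueP, ih ys]

lemma flatPairs (ys : List String) :
    (ys.flatMap (fun y => ["\\n", y])).flatMap String.toList =
      ys.flatMap (fun y => "\\n".toList ++ y.toList) := by
  induction ys with
  | nil => simp
  | cons y t ih => simp [ih]

-- A's loop after the first line: the index is ≥ 1, so only the counter matters
lemma loopA_eq (lpb : Int) : ∀ (rest : List String) (s : Int) (parts : List String) (lib : Int),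
    1 ≤ s → 1 ≤ lib → lib ≤ max lpb 1 →
    ((PySem.List.enumerate rest s).foldl (loopA lpb) (parts, lib)).1
      = parts ++ glueP (max lpb 1).toNat rest (max lpb 1 - lib).toNat := by
  intro rest
  induction rest with
  | nil => intro s parts lib _ _ _; simp [PySem.List.enumerate, glueP]
  | cons l ls ih =>
    intro s parts lib hs hlib1 hlib2
    have hm : 1 ≤ max lpb 1 := le_max_right _ _
    rw [PySem.List.enumerate_cons, List.foldl_cons]
    show ((PySem.List.enumerate ls (s+1)).foldl (loopA lpb) (loopA lpb (parts, lib) (s, l))).1 = _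
    rw [loopA, if_pos (by omega : (s, l).1 > 0)]
    by_cases hge : lib ≥ lpb
    · rw [if_pos (by exact hge)]
      have hc : (max lpb 1 - lib).toNat = 0 := by omega
      rw [hc]
      rw [show (0 : Int) + 1 = 1 from rfl]
      rw [ih (s+1) _ 1 (by omega) (by omega) hm]
      simp only [glueP]
      rw [show (max lpb 1 - 1).toNat = (max lpb 1).toNat - 1 by omega]
      simp [List.append_assoc]
    · rw [if_neg hge]
      have hc : (max lpb 1 - lib).toNat = (max lpb 1 - (lib + 1)).toNat + 1 := by omega
      rw [hc]
      rw [ih (s+1) _ (lib+1) (by omega) (by omega) (by omega)]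
      simp [glueP, List.append_assoc]

-- B's list of box contents (as character lists)
def Bchunks (lpb : Int) (lines : List String) : List (List Char) :=
  (PySem.List.pyRange 0 (lines.length : Int) (max lpb 1)).map
    (fun i => ("\\n".toList).intercalate
      ((PySem.List.slice lines (some i) (some (i + max lpb 1))).map String.toList))

lemma alt_toList (lines : List String) (lpb : Int) :
    (distribute_lines_py_alt lines lpb).toList = ("\\p".toList).intercalate (Bchunks lpb lines) := by
  unfold distribute_lines_py_alt Bchunks
  rw [PySem.Str.toList_join]
  simp only [PySem.Chars.join, List.map_map]
  congr 1
  apply List.map_congr_left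
  intro i _
  simp only [Function.comp_apply]
  rw [PySem.Str.toList_join]
  simp [PySem.Chars.join]

lemma Bchunks_ne_nil (lpb : Int) (y : String) (ys : List String) : Bchunks lpb (y :: ys) ≠ [] := by
  unfold Bchunks
  rw [pyRange_pos_cons 0 _ _ (by omega : (0:Int) < max lpb 1) (by simp)]
  simp

lemma head_chunk (lpb : Int) (l : String) (xs : List String) :
    PySem.List.slice (l :: xs) (some 0) (some (0 + max lpb 1)) =
      l :: xs.take ((max lpb 1).toNat - 1) := by
  have hm : 1 ≤ max lpb 1 := le_max_right _ _
  rw [show (0 : Int) = ((0 : Nat) : Int) from rfl,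
      show ((0:Nat) : Int) + max lpb 1 = (((max lpb 1).toNat : Nat) : Int) by omega,
      PySem.List.slice_natCast]
  simp only [Nat.sub_zero, List.drop_zero]
  conv_lhs => rw [show (max lpb 1).toNat = ((max lpb 1).toNat - 1) + 1 by omega]
  rw [List.take_succ_cons]

-- the slice of the i-th later box equals the corresponding slice of the list with its first box dropped
lemma slice_shift (l : String) (xs : List String) (l' : String) (xs' : List String)
    (sz : Int) (hsz : 1 ≤ sz) (heq : (l' :: xs' : List String) = (l :: xs).drop sz.toNat)
    (i : Int) (hi0 : 0 ≤ i) :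
    PySem.List.slice (l :: xs) (some (i + sz)) (some (i + sz + sz)) =
      PySem.List.slice (l' :: xs') (some i) (some (i + sz)) := by
  obtain ⟨iN, rfl⟩ : ∃ k : Nat, i = (k : Int) := ⟨i.toNat, by omega⟩
  rw [show (iN : Int) + sz = ((iN + sz.toNat : Nat) : Int) by omega,
      show ((iN + sz.toNat : Nat) : Int) + sz = ((iN + sz.toNat + sz.toNat : Nat) : Int) by omega,
      PySem.List.slice_natCast, PySem.List.slice_natCast]
  rw [heq, List.drop_drop]
  congr 1
  · omega
  · congr 1
    omega

lemma Bchunks_glue (lpb : Int) : ∀ (n : Nat) (l : String) (xs : List String), xs.length ≤ n →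
    ("\\p".toList).intercalate (Bchunks lpb (l :: xs))
      = l.toList ++ (glueP (max lpb 1).toNat xs ((max lpb 1).toNat - 1)).flatMap String.toList := by
  intro n
  induction n with
  | zero =>
    intro l xs hlen
    have hxs : xs = [] := by cases xs <;> simp_all
    subst hxs
    have hm : 1 ≤ max lpb 1 := le_max_right _ _
    unfold Bchunks
    rw [pyRange_pos_cons 0 _ _ (by omega) (by simp),
        pyRange_pos_nil _ _ _ (by omega) (by simp)]
    simp only [List.map_cons, List.map_nil]
    rw [interOne, head_chunk]
    simp [glueP, interOne]
  | succ n ih =>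
    intro l xs hlen
    have hm : 1 ≤ max lpb 1 := le_max_right _ _
    set sz : Int := max lpb 1 with hszdef
    have hszN1 : 1 ≤ sz.toNat := by omega
    unfold Bchunks
    rw [← hszdef]
    rw [pyRange_pos_cons 0 _ _ (by omega) (by simp), show (0 : Int) + sz = sz by ring]
    simp only [List.map_cons]
    rw [show PySem.List.slice (l :: xs) (some 0) (some (0 + sz)) = l :: xs.take (sz.toNat - 1) from by
          rw [hszdef]; exact head_chunk lpb l xs]
    rw [interN]
    by_cases hsmall : ((l :: xs).length : Int) ≤ sz
    · rw [pyRange_pos_nil _ _ _ (by omega) hsmall]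
      simp only [List.map_nil]
      rw [interOne]
      have hx : xs.length ≤ sz.toNat - 1 := by simp at hsmall; omega
      rw [glueP_eq, List.take_of_length_le hx, List.drop_eq_nil_of_le (by omega)]
      simp [flatPairs]
    · rw [not_le] at hsmall
      have hlen2 : sz.toNat < (l :: xs).length := by simp at hsmall ⊢; omega
      obtain ⟨l', xs', heq⟩ : ∃ y ys, (l :: xs).drop sz.toNat = y :: ys := by
        cases hd : (l :: xs).drop sz.toNat with
        | nil => exfalso; have := List.drop_eq_nil_iff.mp hd; omega
        | cons y ys => exact ⟨y, ys, rfl⟩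
      have hlen' : (((l' :: xs').length : Nat) : Int) = ((l :: xs).length : Int) - sz := by
        have : (l' :: xs').length = (l :: xs).length - sz.toNat := by rw [← heq]; simp
        rw [this]; omega
      have hshift : PySem.List.pyRange sz ((l :: xs).length : Int) sz
          = (PySem.List.pyRange 0 (((l :: xs).length : Int) - sz) sz).map (· + sz) := by
        have := pyRange_pos_shift 0 (((l :: xs).length : Int) - sz) sz sz (by omega)
        rw [show (0 : Int) + sz = sz by ring, show (((l :: xs).length : Int) - sz) + sz = ((l :: xs).length : Int) by ring] at this
        exact this
      have htail : (PySem.List.pyRange sz ((l :: xs).length : Int) sz).map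
            (fun i => ("\\n".toList).intercalate
              ((PySem.List.slice (l :: xs) (some i) (some (i + sz))).map String.toList))
          = Bchunks lpb (l' :: xs') := by
        rw [hshift, List.map_map]
        unfold Bchunks
        rw [← hszdef, hlen']
        apply List.map_congr_left
        intro i hi
        have hi0 : 0 ≤ i := by
          have := (PySem.List.mem_pyRange_iff_of_pos (by omega : (0:Int) < sz) i).mp hi
          omega
        simp only [Function.comp_apply]
        rw [slice_shift l xs l' xs' sz (by omega) heq.symm i hi0]
      rw [htail]
      rcases hB : Bchunks lpb (l' :: xs') with _ | ⟨b0, bs⟩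
      · exact absurd hB (Bchunks_ne_nil lpb l' xs')
      · rw [interCons, ← hB]
        rw [ih l' xs' (by
              have h2 : (l' :: xs').length = (l :: xs).length - sz.toNat := by rw [← heq]; simp
              simp at h2 hlen2 ⊢
              omega)]
        have hdropx : xs.drop (sz.toNat - 1) = l' :: xs' := by
          have hds : (l :: xs).drop sz.toNat = xs.drop (sz.toNat - 1) := by
            conv_lhs => rw [show sz.toNat = (sz.toNat - 1) + 1 by omega]
            exact List.drop_succ_cons
          rw [← hds, heq]
        rw [glueP_eq _ (sz.toNat - 1) xs, hdropx]
        simp [flatPairs, List.append_assoc]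

-- ===== VERDICT (by name: the statement is the Claim_ definition above) =====
theorem distribute_lines_py_spec : Claim_equal_distribute_lines_py := by
  intro lines lpb _
  unfold Spec_distribute_lines_py
  apply String.toList_inj.mp
  cases lines with
  | nil =>
    rw [alt_toList]
    unfold Bchunks
    rw [show (([] : List String).length : Int) = 0 by simp, pyRange_pos_nil 0 0 _ (by omega) le_rfl]
    simp [distribute_lines_py, List.intercalate]
  | cons l ls =>
    have hm : 1 ≤ max lpb 1 := le_max_right _ _
    rw [alt_toList, Bchunks_glue lpb ls.length l ls le_rfl]
    unfold distribute_lines_py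
    rw [if_neg (by simp)]
    rw [PySem.List.enumerate_cons, List.foldl_cons]
    show (PySem.Str.join "" ((PySem.List.enumerate ls (0+1)).foldl (loopA lpb) (loopA lpb ([], 0) (0, l))).1).toList = _
    rw [show loopA lpb ([], 0) (0, l) = ([l], 1) from by simp [loopA]]
    rw [loopA_eq lpb ls (0+1) [l] 1 (by omega) (by omega) hm]
    rw [PySem.Str.toList_join]
    simp only [PySem.Chars.join]
    rw [show "".toList = ([] : List Char) from rfl, interNilFlat]
    rw [show (max lpb 1 - 1).toNat = (max lpb 1).toNat - 1 by omega]
    simp [List.flatMap]
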